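-- pv_equiv track=rewrite | github.com/WSL0809/maas-test | main.py | collapse_outcomes_for_model
-- ===== SOURCE A (Python) =====
-- MODEL_ALIASES = {
--     "minimax-m21": {"minimax-m21", "minimax-m2.1"},
--     "minimax-m25": {"minimax-m25", "minimax-m2.5"},
-- }
--
-- STATUS_PASS = "✅"
--
-- STATUS_FAIL = "❌"
--
-- STATUS_PARTIAL = "⚠️"
--
-- STATUS_NOT_RUN = "⏳"
--
-- def collapse_outcomes_for_model(rows: list[dict[str, str]], model_id: str) -> str:
--     aliases = MODEL_ALIASES.get(model_id, {model_id})
--     outcomes = [row["outcome"] for row in rows if row.get("model") in aliases]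
--     if not outcomes:
--         return STATUS_NOT_RUN
--     unique_outcomes = set(outcomes)
--     if unique_outcomes == {"passed"}:
--         return STATUS_PASS
--     if unique_outcomes == {"failed"} or unique_outcomes == {"skipped"}:
--         return STATUS_FAIL
--     return STATUS_PARTIAL
-- ===== SOURCE B (Python) =====
-- MODEL_ALIASES = {
--     "minimax-m21": {"minimax-m21", "minimax-m2.1"},
--     "minimax-m25": {"minimax-m25", "minimax-m2.5"},
-- }
--
-- STATUS_PASS = "✅"
-- STATUS_FAIL = "❌"
-- STATUS_PARTIAL = "⚠️"
-- STATUS_NOT_RUN = "⏳"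
--
-- # B is a map-reduce over a five-element join-semilattice: each matching row's outcome is
-- # mapped to a token ("passed"/"failed"/"skipped"/"mixed"), the tokens are combined with an
-- # associative, absorbing join, and the final lattice element (or None = identity, no match)
-- # is rendered to a status symbol by a table.  There is no outcomes list, no set, and no
-- # post-loop uniformity tests.
--
-- _RENDER = {
--     None: STATUS_NOT_RUN,
--     "passed": STATUS_PASS,
--     "failed": STATUS_FAIL,
--     "skipped": STATUS_FAIL,
--     "mixed": STATUS_PARTIAL,
-- }
--
--
-- def _token(outcome):
--     return outcome if outcome in ("passed", "failed", "skipped") else "mixed"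
--
--
-- def _join(acc, token):
--     if acc is None:
--         return token
--     if acc == token:
--         return acc
--     return "mixed"
--
--
-- def collapse_outcomes_for_model(rows: list, model_id: str) -> str:
--     aliases = MODEL_ALIASES.get(model_id, {model_id})
--     acc = None
--     for row in rows:
--         if row.get("model") in aliases:
--             acc = _join(acc, _token(row["outcome"]))
--     return _RENDER[acc]
-- ===== Notes on version B (the rewrite author's own statement) =====
-- stated objective: alternative
-- what changed: Replaces the outcomes list + set construction + set-equality classification by a map-reduce over a five-element join-semilattice: each matching outcome is mapped to a token, the tokens are folded with an associative absorbing join, and the final lattice element is rendered to a status by a table; no set and no post-loop uniformity tests.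
import Mathlib
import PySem

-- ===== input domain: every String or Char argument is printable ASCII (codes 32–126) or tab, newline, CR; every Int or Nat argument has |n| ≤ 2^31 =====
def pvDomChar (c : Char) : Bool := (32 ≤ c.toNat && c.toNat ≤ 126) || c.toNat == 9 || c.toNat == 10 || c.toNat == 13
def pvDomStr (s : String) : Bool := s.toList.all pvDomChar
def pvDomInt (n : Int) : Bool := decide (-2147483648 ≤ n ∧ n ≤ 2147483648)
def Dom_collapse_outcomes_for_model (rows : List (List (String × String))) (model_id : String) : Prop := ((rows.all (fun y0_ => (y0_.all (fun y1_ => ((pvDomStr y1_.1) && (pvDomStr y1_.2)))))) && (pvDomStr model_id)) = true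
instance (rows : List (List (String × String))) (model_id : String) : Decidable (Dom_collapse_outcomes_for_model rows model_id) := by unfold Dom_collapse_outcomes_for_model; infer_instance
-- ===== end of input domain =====

-- B replaces the outcomes-list/set/set-equality classification by a join-semilattice
-- map-reduce: tokens folded with an absorbing join, result rendered by a table
-- (objective: alternative algorithm, same asymptotic cost).

-- ===== PORT A =====
-- MODEL_ALIASES, shared module constant of both Pythons
def MODEL_ALIASES : PySem.Dict String (PySem.Set String) := PySem.Dict.mk
  [("minimax-m21", PySem.Set.ofList ["minimax-m21", "minimax-m2.1"]),
   ("minimax-m25", PySem.Set.ofList ["minimax-m25", "minimax-m2.5"])]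

-- aliases = MODEL_ALIASES.get(model_id, {model_id})  (identical expression in both Pythons)
def pvAliases (model_id : String) : PySem.Set String :=
  PySem.Dict.getD MODEL_ALIASES model_id (PySem.Set.ofList [model_id])

-- row.get("model") in aliases  (identical filter expression in both Pythons; None in a set of
-- strings is False)
def pvRowMatches (model_id : String) (row : List (String × String)) : Bool :=
  match PySem.Dict.get? (PySem.Dict.mk row) "model" with
  | some m => PySem.Set.contains (pvAliases model_id) m
  | none => false

-- row["outcome"]: none = KeyError (these inputs are excluded by Pre_ below)
def pvOutcome (row : List (String × String)) : Option String :=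
  PySem.Dict.get? (PySem.Dict.mk row) "outcome"

def collapse_outcomes_for_model (rows : List (List (String × String))) (model_id : String) : String :=
  let outcomes : List (Option String) :=
    (rows.filter (fun row => pvRowMatches model_id row)).map (fun row => pvOutcome row)
  if outcomes.isEmpty then "⏳"
  else
    let unique_outcomes := PySem.Set.ofList outcomes
    if PySem.Set.equal unique_outcomes (PySem.Set.ofList [some "passed"]) then "✅"
    else if PySem.Set.equal unique_outcomes (PySem.Set.ofList [some "failed"]) ||
            PySem.Set.equal unique_outcomes (PySem.Set.ofList [some "skipped"]) then "❌"
    else "⚠️"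

-- ===== PORT B =====
-- _token(outcome); the none case is row["outcome"] missing = KeyError in Python (outside Pre_)
def pvTok (o : Option String) : String :=
  match o with
  | some s => if s == "passed" || s == "failed" || s == "skipped" then s else "mixed"
  | none => "mixed"

-- _join(acc, token): associative absorbing join of the semilattice
def pvJoin (acc : Option String) (t : String) : String :=
  match acc with
  | none => t
  | some x => if x == t then x else "mixed"

-- the loop body of Source B
def pvStepB (model_id : String) (acc : Option String) (row : List (String × String)) : Option String :=
  if pvRowMatches model_id row then some (pvJoin acc (pvTok (pvOutcome row))) else acc

def collapse_outcomes_for_model_alt (rows : List (List (String × String))) (model_id : String) : String :=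
  let acc := rows.foldl (pvStepB model_id) none
  -- _RENDER[acc]: acc is always one of the five _RENDER keys, so the dict lookup is this match
  match acc with
  | none => "⏳"
  | some "passed" => "✅"
  | some "failed" => "❌"
  | some "skipped" => "❌"
  | some _ => "⚠️"

-- ===== PRECONDITION & SPEC =====
-- Pre_ excludes exactly the inputs on which both Pythons raise KeyError: a row matching the
-- aliases of model_id that has no "outcome" key.
def Pre_collapse_outcomes_for_model (rows : List (List (String × String))) (model_id : String) : Prop :=
  ∀ row ∈ rows, pvRowMatches model_id row = true → (pvOutcome row).isSome = true
instance (rows : List (List (String × String))) (model_id : String) : Decidable (Pre_collapse_outcomes_for_model rows model_id) := by unfold Pre_collapse_outcomes_for_model; infer_instance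
def pvWitness_collapse_outcomes_for_model : (List (List (String × String))) × String :=
  ([[("model", "minimax-m2.1"), ("outcome", "passed")], [("model", "other"), ("x", "y")]], "minimax-m21")

def Spec_collapse_outcomes_for_model (rows : List (List (String × String))) (model_id : String) (out : String) : Prop := out = collapse_outcomes_for_model_alt rows model_id
instance (rows : List (List (String × String))) (model_id : String) (out : String) : Decidable (Spec_collapse_outcomes_for_model rows model_id out) := by unfold Spec_collapse_outcomes_for_model; infer_instance

-- ===== CLAIM (what is proved, stated in full; the proofs are below) =====
def Claim_equal_collapse_outcomes_for_model : Prop := ∀ (rows : List (List (String × String))) (model_id : String), Dom_collapse_outcomes_for_model rows model_id → Pre_collapse_outcomes_for_model rows model_id → Spec_collapse_outcomes_for_model rows model_id (collapse_outcomes_for_model rows model_id)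

-- ===== LEMMAS AND PROOFS =====

-- the outcomes of the matching rows, the common data both classifications describe
def pvOuts (rows : List (List (String × String))) (model_id : String) : List (Option String) :=
  (rows.filter (fun row => pvRowMatches model_id row)).map (fun row => pvOutcome row)

-- B's fold over rows collapses to a fold of the join over the outcomes of the matching rows
lemma foldB_eq_foldOuts (model_id : String) (rows : List (List (String × String)))
    (acc : Option String) :
    rows.foldl (pvStepB model_id) acc =
      (pvOuts rows model_id).foldl (fun a o => some (pvJoin a (pvTok o))) acc := by
  induction rows generalizing acc with
  | nil => simp [pvOuts]
  | cons r rs ih =>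
    by_cases hm : pvRowMatches model_id r = true
    · simp [pvOuts, hm, pvStepB, List.foldl_cons, ih]
    · simp [pvOuts, hm, pvStepB, List.foldl_cons, ih]

-- the join fold from a seeded token: the seed survives iff every token equals it
lemma foldJoin_char (outs : List (Option String)) (t : String) :
    outs.foldl (fun a o => some (pvJoin a (pvTok o))) (some t) =
      some (if outs.all (fun o => pvTok o == t) then t else "mixed") := by
  induction outs generalizing t with
  | nil => simp
  | cons o rest ih =>
    rw [List.foldl_cons]
    by_cases h : pvTok o = t
    · have hstep : pvJoin (some t) (pvTok o) = t := by
        simp [pvJoin, h]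
      rw [hstep, ih]
      simp [h]
    · have hstep : pvJoin (some t) (pvTok o) = "mixed" := by
        simp only [pvJoin]
        exact if_neg (fun e => h (beq_iff_eq.mp e).symm)
      rw [hstep, ih]
      simp [h]

lemma equal_singleton_iff (outs : List (Option String)) (x : Option String) :
    PySem.Set.equal (PySem.Set.ofList outs) (PySem.Set.ofList [x]) = true ↔
      (x ∈ outs ∧ ∀ y ∈ outs, y = x) := by
  rw [PySem.Set.equal_iff]
  constructor
  · intro h
    refine ⟨?_, fun y hy => ?_⟩
    · have := (h x).mpr (by simp [PySem.Set.mem_ofList])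
      simpa [PySem.Set.mem_ofList] using this
    · have := (h y).mp (by simpa [PySem.Set.mem_ofList] using hy)
      simpa [PySem.Set.mem_ofList] using this
  · rintro ⟨hx, hall⟩ y
    simp only [PySem.Set.mem_ofList, List.mem_singleton]
    exact ⟨fun hy => hall y hy, fun hy => hy ▸ hx⟩

-- the token map is injective on the three named outcomes
lemma tok_eq_named (y : Option String) (s : String)
    (hs : s = "passed" ∨ s = "failed" ∨ s = "skipped") :
    pvTok y = s ↔ y = some s := by
  have hmx : "mixed" ≠ s := by rcases hs with h | h | h <;> (subst h; decide)
  cases y with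
  | none =>
    simp only [pvTok]
    exact ⟨fun h => absurd h hmx, fun h => by cases h⟩
  | some v =>
    simp only [pvTok, Option.some.injEq]
    split_ifs with hc
    · exact Iff.rfl
    · constructor
      · intro h; exact absurd h hmx
      · intro h; subst h; exfalso
        rcases hs with h | h | h <;> (subst h; simp at hc)

-- every token is a named outcome's token or "mixed"
lemma tok_cases (o : Option String) :
    pvTok o = "passed" ∨ pvTok o = "failed" ∨ pvTok o = "skipped" ∨ pvTok o = "mixed" := by
  cases o with
  | none => simp [pvTok]
  | some v =>
    simp only [pvTok]
    split_ifs with h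
    · rcases Bool.or_eq_true_iff.mp h with h' | h'
      · rcases Bool.or_eq_true_iff.mp h' with h'' | h''
        · exact Or.inl (by simpa using h'')
        · exact Or.inr (Or.inl (by simpa using h''))
      · exact Or.inr (Or.inr (Or.inl (by simpa using h')))
    · exact Or.inr (Or.inr (Or.inr rfl))

-- set(outs) == {some s} is false when some element's token differs from s
lemma equal_false_of_tok_ne (outs : List (Option String)) (s : String)
    (hs : s = "passed" ∨ s = "failed" ∨ s = "skipped")
    (y : Option String) (hy : y ∈ outs) (hne : pvTok y ≠ s) :
    PySem.Set.equal (PySem.Set.ofList outs) (PySem.Set.ofList [some s]) = false := by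
  rw [Bool.eq_false_iff]
  intro h
  exact hne (((tok_eq_named y s hs).mpr ((equal_singleton_iff outs (some s)).mp h |>.2 y hy)))

theorem collapse_main (rows : List (List (String × String))) (model_id : String) :
    collapse_outcomes_for_model rows model_id = collapse_outcomes_for_model_alt rows model_id := by
  have hA : collapse_outcomes_for_model rows model_id =
      (if (pvOuts rows model_id).isEmpty then "⏳"
       else if PySem.Set.equal (PySem.Set.ofList (pvOuts rows model_id)) (PySem.Set.ofList [some "passed"]) then "✅"
       else if PySem.Set.equal (PySem.Set.ofList (pvOuts rows model_id)) (PySem.Set.ofList [some "failed"]) ||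
               PySem.Set.equal (PySem.Set.ofList (pvOuts rows model_id)) (PySem.Set.ofList [some "skipped"]) then "❌"
       else "⚠️") := rfl
  rw [hA]
  unfold collapse_outcomes_for_model_alt
  rw [foldB_eq_foldOuts]
  rcases houts : pvOuts rows model_id with _ | ⟨o, rest⟩
  · simp
  · have hfold : (o :: rest).foldl (fun a o => some (pvJoin a (pvTok o))) none =
        some (if rest.all (fun y => pvTok y == pvTok o) then pvTok o else "mixed") := by
      rw [List.foldl_cons]
      exact foldJoin_char rest (pvTok o)
    rw [hfold]
    have hne : ((o :: rest).isEmpty) = false := rfl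
    rw [hne]
    by_cases hall : rest.all (fun y => pvTok y == pvTok o) = true
    · rw [if_pos hall]
      have hally : ∀ y ∈ rest, pvTok y = pvTok o := by
        intro y hy; exact beq_iff_eq.mp (List.all_eq_true.mp hall y hy)
      rcases tok_cases o with hto | hto | hto | hto
      · -- all tokens "passed": outs = all some "passed", A returns ✅
        have heq : PySem.Set.equal (PySem.Set.ofList (o :: rest)) (PySem.Set.ofList [some "passed"]) = true := by
          rw [equal_singleton_iff]
          have ho : o = some "passed" := (tok_eq_named o _ (Or.inl rfl)).mp hto
          refine ⟨ho ▸ List.mem_cons_self, ?_⟩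
          intro y hy
          rcases List.mem_cons.mp hy with h | h
          · exact h ▸ ho
          · exact (tok_eq_named y _ (Or.inl rfl)).mp (hto ▸ hally y h)
        simp [heq, hto]
      · -- all tokens "failed"
        have heqf : PySem.Set.equal (PySem.Set.ofList (o :: rest)) (PySem.Set.ofList [some "failed"]) = true := by
          rw [equal_singleton_iff]
          have ho : o = some "failed" := (tok_eq_named o _ (Or.inr (Or.inl rfl))).mp hto
          refine ⟨ho ▸ List.mem_cons_self, ?_⟩
          intro y hy
          rcases List.mem_cons.mp hy with h | h
          · exact h ▸ ho
          · exact (tok_eq_named y _ (Or.inr (Or.inl rfl))).mp (hto ▸ hally y h)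
        have heqp := equal_false_of_tok_ne (o :: rest) "passed" (Or.inl rfl) o
          List.mem_cons_self (by rw [hto]; decide)
        simp [heqp, heqf, hto]
      · -- all tokens "skipped"
        have heqs : PySem.Set.equal (PySem.Set.ofList (o :: rest)) (PySem.Set.ofList [some "skipped"]) = true := by
          rw [equal_singleton_iff]
          have ho : o = some "skipped" := (tok_eq_named o _ (Or.inr (Or.inr rfl))).mp hto
          refine ⟨ho ▸ List.mem_cons_self, ?_⟩
          intro y hy
          rcases List.mem_cons.mp hy with h | h
          · exact h ▸ ho
          · exact (tok_eq_named y _ (Or.inr (Or.inr rfl))).mp (hto ▸ hally y h)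
        have heqp := equal_false_of_tok_ne (o :: rest) "passed" (Or.inl rfl) o
          List.mem_cons_self (by rw [hto]; decide)
        have heqf := equal_false_of_tok_ne (o :: rest) "failed" (Or.inr (Or.inl rfl)) o
          List.mem_cons_self (by rw [hto]; decide)
        simp [heqp, heqf, heqs, hto]
      · -- o's token "mixed": no singleton of a named outcome matches
        have heqp := equal_false_of_tok_ne (o :: rest) "passed" (Or.inl rfl) o
          List.mem_cons_self (by rw [hto]; decide)
        have heqf := equal_false_of_tok_ne (o :: rest) "failed" (Or.inr (Or.inl rfl)) o
          List.mem_cons_self (by rw [hto]; decide)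
        have heqs := equal_false_of_tok_ne (o :: rest) "skipped" (Or.inr (Or.inr rfl)) o
          List.mem_cons_self (by rw [hto]; decide)
        simp [heqp, heqf, heqs, hto]
    · -- some token differs from o's: mixed; and no named singleton matches
      rw [if_neg hall]
      obtain ⟨y, hy, hyne⟩ : ∃ y ∈ rest, pvTok y ≠ pvTok o := by
        obtain ⟨y, hy, hyne'⟩ := List.all_eq_false.mp (Bool.eq_false_iff.mpr hall)
        exact ⟨y, hy, by simpa using hyne'⟩
      have key : ∀ s, s = "passed" ∨ s = "failed" ∨ s = "skipped" →
          PySem.Set.equal (PySem.Set.ofList (o :: rest)) (PySem.Set.ofList [some s]) = false := by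
        intro s hs
        by_cases hos : pvTok o = s
        · exact equal_false_of_tok_ne (o :: rest) s hs y (List.mem_cons_of_mem o hy) (hos ▸ hyne)
        · exact equal_false_of_tok_ne (o :: rest) s hs o List.mem_cons_self hos
      have hp := key "passed" (Or.inl rfl)
      have hf := key "failed" (Or.inr (Or.inl rfl))
      have hsk := key "skipped" (Or.inr (Or.inr rfl))
      have hmx : (match (some "mixed" : Option String) with
        | none => "⏳" | some "passed" => "✅" | some "failed" => "❌"
        | some "skipped" => "❌" | some _ => "⚠️") = "⚠️" := rfl
      simp [hp, hf, hsk]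

-- ===== VERDICT (by name: the statement is the Claim_ definition above) =====
theorem collapse_outcomes_for_model_spec : Claim_equal_collapse_outcomes_for_model := by
  intro rows model_id _ _
  unfold Spec_collapse_outcomes_for_model
  exact collapse_main rows model_id
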